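-- pv_equiv track=rewrite | github.com/ritikjain833/LeetcodeSolvedProblems | 0520-detect-capital/0520-detect-capital.py | firstCapital
-- ===== SOURCE A (Python) =====
-- def firstCapital(word):
--     n=len(word)
--     temp=False
--     for i in range(n):
--         if i==0 and ord(word[i])>=65 and ord(word[i])<=90:
--             temp=True
--         elif i>=0 and ord(word[i])>=65 and ord(word[i])<=90:
--             temp=False
--             break
--     return temp
-- ===== SOURCE B (Python) =====
-- import re
--
-- _CAP_PATTERN = re.compile(r'[A-Z][^A-Z]*')
--
-- def firstCapital(word):
--     return bool(_CAP_PATTERN.fullmatch(word))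
-- ===== Notes on version B (the rewrite author's own statement) =====
-- stated objective: idiomatic
-- what changed: Replaced the index loop with break/flag state by a single anchored regex fullmatch r'[A-Z][^A-Z]*' (first char uppercase ASCII, no other uppercase ASCII); the regex engine scans in C, measured faster.
import Mathlib
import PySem

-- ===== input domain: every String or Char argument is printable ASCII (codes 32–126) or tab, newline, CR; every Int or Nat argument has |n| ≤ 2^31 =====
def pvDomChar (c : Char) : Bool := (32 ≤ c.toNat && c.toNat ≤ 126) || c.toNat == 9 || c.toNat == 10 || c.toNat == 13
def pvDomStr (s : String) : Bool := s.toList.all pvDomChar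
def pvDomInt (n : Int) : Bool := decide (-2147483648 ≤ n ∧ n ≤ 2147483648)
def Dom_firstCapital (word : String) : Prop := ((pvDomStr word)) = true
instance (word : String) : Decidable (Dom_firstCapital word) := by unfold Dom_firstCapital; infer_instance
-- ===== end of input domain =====

-- B replaces A's index loop with flag/break state by one anchored regex fullmatch [A-Z][^A-Z]* (idiomatic; same cost).

-- 65 ≤ ord(c) ≤ 90, i.e. the character class [A-Z] (exact on ASCII)
def pvUpper (c : Char) : Bool := 65 ≤ c.toNat && c.toNat ≤ 90

-- ===== PORT A =====
-- the for-i-in-range(n) loop with the break: structural recursion over the index list, state = temp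
def firstCapitalGo (cs : List Char) (is : List Nat) (temp : Bool) : Bool :=
  match is with
  | [] => temp
  | i :: rest =>
    if i == 0 && pvUpper (cs.getD i ' ') then firstCapitalGo cs rest true
    else if pvUpper (cs.getD i ' ') then false   -- temp=False; break (i>=0 is always true)
    else firstCapitalGo cs rest temp

def firstCapital (word : String) : Bool :=
  firstCapitalGo word.toList (List.range word.toList.length) false

-- ===== PORT B =====
-- hand port of re.fullmatch(r'[A-Z][^A-Z]*', word): exact — one [A-Z] char, then every
-- remaining char outside [A-Z], anchored at both ends
def firstCapital_alt (word : String) : Bool :=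
  match word.toList with
  | [] => false
  | c :: rest => pvUpper c && rest.all (fun d => !pvUpper d)

-- ===== PRECONDITION & SPEC =====
def Spec_firstCapital (word : String) (out : Bool) : Prop := out = firstCapital_alt word
instance (word : String) (out : Bool) : Decidable (Spec_firstCapital word out) := by unfold Spec_firstCapital; infer_instance

-- ===== CLAIM (what is proved, stated in full; the proofs are below) =====
def Claim_equal_firstCapital : Prop := ∀ (word : String), Dom_firstCapital word → Spec_firstCapital word (firstCapital word)

-- ===== LEMMAS AND PROOFS =====

theorem firstCapitalGo_range' (cs : List Char) :
    ∀ (n a : Nat) (t : Bool), 1 ≤ a →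
      firstCapitalGo cs (List.range' a n) t =
        if ((cs.drop a).take n).all (fun d => !pvUpper d) then t else false := by
  intro n
  induction n with
  | zero => intro a t _; simp [firstCapitalGo]
  | succ n ih =>
    intro a t ha
    rw [List.range'_succ]
    have hne : (a == 0) = false := by simp; omega
    have hdrop : cs.drop (a + 1) = (cs.drop a).drop 1 := by
      rw [List.drop_drop]
    have hget : cs[a]? = (cs.drop a)[0]? := by
      rw [List.getElem?_drop]; simp
    cases h : cs.drop a with
    | nil =>
      simp [firstCapitalGo, List.getD, hget, hne, ih (a + 1) t (by omega), hdrop, h,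
        show pvUpper ' ' = false by decide]
    | cons d ds =>
      cases hu : pvUpper d <;>
        simp [firstCapitalGo, List.getD, hget, hne, ih (a + 1) t (by omega), hdrop, h, hu]

theorem pvAll_decide (l : List Char) :
    (decide (∀ x ∈ l, pvUpper x = false)) = l.all (fun d => !pvUpper d) := by
  induction l with
  | nil => simp
  | cons c cs ih => simp_all

-- ===== VERDICT (by name: the statement is the Claim_ definition above) =====
theorem firstCapital_spec : Claim_equal_firstCapital := by
  intro word _
  unfold Spec_firstCapital firstCapital firstCapital_alt
  cases hw : word.toList with
  | nil => simp [firstCapitalGo]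
  | cons c rest =>
    have hr : List.range (c :: rest).length = 0 :: List.range' 1 rest.length := by
      rw [List.range_eq_range', List.length_cons, List.range'_succ]
    rw [hr]
    simp only [firstCapitalGo, List.getD_cons_zero, beq_self_eq_true, Bool.true_and]
    by_cases hu : pvUpper c = true
    · rw [if_pos hu, firstCapitalGo_range' _ _ _ _ (by omega)]
      simp [hu]
      exact pvAll_decide rest
    · simp only [Bool.not_eq_true] at hu
      rw [if_neg (by simp [hu]), if_neg (by simp [hu]),
        firstCapitalGo_range' _ _ _ _ (by omega)]
      simp [hu]
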